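-- pv_equiv track=rewrite | github.com/jonathan-kofman/millforge-ai | backend/agents/aria_bridge_agent.py | map_material
-- ===== SOURCE A (Python) =====
-- from typing import Any, Dict, List, Optional
--
-- MATERIAL_MAP: Dict[str, str] = {
--     # Aluminum alloys → aluminum
--     "6061-T6": "aluminum",
--     "7075-T6": "aluminum",
--     "2024-T3": "aluminum",
--     "5052-H32": "aluminum",
--     "aluminum": "aluminum",
--     "aluminium": "aluminum",
--     "al": "aluminum",
--     # Steel alloys → steel
--     "1018": "steel",
--     "4140": "steel",
--     "4340": "steel",
--     "316L": "steel",
--     "304": "steel",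
--     "17-4ph": "steel",
--     "stainless": "steel",
--     "steel": "steel",
--     "mild_steel": "steel",
--     # Titanium alloys → titanium
--     "ti-6al-4v": "titanium",
--     "gr5": "titanium",
--     "grade5": "titanium",
--     "grade2": "titanium",
--     "titanium": "titanium",
--     "ti": "titanium",
--     # Copper alloys → copper
--     "c110": "copper",
--     "c360": "copper",
--     "brass": "copper",
--     "bronze": "copper",
--     "copper": "copper",
--     "cu": "copper",
-- }
--
-- def map_material(aria_material: str) -> str:
--     """
--     Return the MillForge MaterialType value for an ARIA material string.
--     Raises ValueError if material is not recognised.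
--     """
--     key = aria_material.strip().lower()
--     # Try exact lower-case match first
--     for k, v in MATERIAL_MAP.items():
--         if k.lower() == key:
--             return v
--     # Try prefix / substring match as fallback
--     for k, v in MATERIAL_MAP.items():
--         if key.startswith(k.lower()) or k.lower().startswith(key):
--             return v
--     raise ValueError(
--         f"Unknown ARIA material: '{aria_material}'. "
--         f"Supported materials: {sorted(set(MATERIAL_MAP.values()))}"
--     )
-- ===== SOURCE B (Python) =====
-- from typing import Dict
--
-- MATERIAL_MAP: Dict[str, str] = {
--     "6061-T6": "aluminum",
--     "7075-T6": "aluminum",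
--     "2024-T3": "aluminum",
--     "5052-H32": "aluminum",
--     "aluminum": "aluminum",
--     "aluminium": "aluminum",
--     "al": "aluminum",
--     "1018": "steel",
--     "4140": "steel",
--     "4340": "steel",
--     "316L": "steel",
--     "304": "steel",
--     "17-4ph": "steel",
--     "stainless": "steel",
--     "steel": "steel",
--     "mild_steel": "steel",
--     "ti-6al-4v": "titanium",
--     "gr5": "titanium",
--     "grade5": "titanium",
--     "grade2": "titanium",
--     "titanium": "titanium",
--     "ti": "titanium",
--     "c110": "copper",
--     "c360": "copper",
--     "brass": "copper",
--     "bronze": "copper",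
--     "copper": "copper",
--     "cu": "copper",
-- }
--
-- def map_material(aria_material: str) -> str:
--     """Single pass: exact match returns immediately; the first prefix match is
--     remembered as a fallback but any later exact match still wins."""
--     key = aria_material.strip().lower()
--     fallback = None
--     for k, v in MATERIAL_MAP.items():
--         kl = k.lower()
--         if kl == key:
--             return v
--         if fallback is None and (key.startswith(kl) or kl.startswith(key)):
--             fallback = v
--     if fallback is not None:
--         return fallback
--     raise ValueError(
--         f"Unknown ARIA material: '{aria_material}'. "
--         f"Supported materials: {sorted(set(MATERIAL_MAP.values()))}"
--     )
-- ===== Notes on version B (the rewrite author's own statement) =====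
-- stated objective: alternative
-- what changed: Replaces A's two sequential scans of MATERIAL_MAP (exact pass, then prefix pass) by a single scan that returns on an exact match and records the first prefix match as a deferred fallback returned only after the whole scan.
import Mathlib
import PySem

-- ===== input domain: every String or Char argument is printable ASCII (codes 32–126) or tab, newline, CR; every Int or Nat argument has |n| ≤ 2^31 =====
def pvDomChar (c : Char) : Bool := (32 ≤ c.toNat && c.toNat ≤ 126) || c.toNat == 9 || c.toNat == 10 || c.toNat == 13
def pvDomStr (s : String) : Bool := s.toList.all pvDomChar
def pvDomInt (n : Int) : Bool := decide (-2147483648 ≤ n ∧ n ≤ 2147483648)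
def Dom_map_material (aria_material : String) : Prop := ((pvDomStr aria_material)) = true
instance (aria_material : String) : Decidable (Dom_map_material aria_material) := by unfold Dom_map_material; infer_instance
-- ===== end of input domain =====

-- B merges A's two sequential scans of MATERIAL_MAP into a single scan with a deferred
-- prefix fallback (objective: alternative decomposition, same cost).
-- Where Python A raises ValueError both Pythons raise; those inputs are outside Pre_
-- and both ports return "" there.

-- shared constant: the module-level MATERIAL_MAP dict, in insertion order
def MATERIAL_MAP : List (String × String) := [
  ("6061-T6", "aluminum"),
  ("7075-T6", "aluminum"),
  ("2024-T3", "aluminum"),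
  ("5052-H32", "aluminum"),
  ("aluminum", "aluminum"),
  ("aluminium", "aluminum"),
  ("al", "aluminum"),
  ("1018", "steel"),
  ("4140", "steel"),
  ("4340", "steel"),
  ("316L", "steel"),
  ("304", "steel"),
  ("17-4ph", "steel"),
  ("stainless", "steel"),
  ("steel", "steel"),
  ("mild_steel", "steel"),
  ("ti-6al-4v", "titanium"),
  ("gr5", "titanium"),
  ("grade5", "titanium"),
  ("grade2", "titanium"),
  ("titanium", "titanium"),
  ("ti", "titanium"),
  ("c110", "copper"),
  ("c360", "copper"),
  ("brass", "copper"),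
  ("bronze", "copper"),
  ("copper", "copper"),
  ("cu", "copper")]

def stripLower (s : String) : String := PySem.Str.lower (PySem.Str.strip s)

-- ===== PORT A =====
-- first loop: exact lower-case match
def findExact : List (String × String) → String → Option String
  | [], _ => none
  | (k, v) :: rest, key =>
    if PySem.Str.lower k = key then some v else findExact rest key

-- second loop: prefix / substring fallback
def findPrefix : List (String × String) → String → Option String
  | [], _ => none
  | (k, v) :: rest, key =>
    if PySem.Str.startswith key (PySem.Str.lower k) || PySem.Str.startswith (PySem.Str.lower k) key
    then some v else findPrefix rest key

def map_material (aria_material : String) : String :=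
  let key := stripLower aria_material
  match findExact MATERIAL_MAP key with
  | some v => v
  | none =>
    match findPrefix MATERIAL_MAP key with
    | some v => v
    | none => ""   -- Python raises ValueError here; excluded by Pre_

-- ===== PORT B =====
-- single loop, carrying the first prefix match as a deferred fallback
def scanOnce : List (String × String) → String → Option String → Option String
  | [], _, fb => fb
  | (k, v) :: rest, key, fb =>
    let kl := PySem.Str.lower k
    if kl = key then some v
    else scanOnce rest key
      (if fb.isNone && (PySem.Str.startswith key kl || PySem.Str.startswith kl key)
       then some v else fb)

def map_material_alt (aria_material : String) : String :=
  let key := stripLower aria_material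
  match scanOnce MATERIAL_MAP key none with
  | some v => v
  | none => ""   -- Python raises ValueError here; excluded by Pre_

-- ===== PRECONDITION & SPEC =====
-- Pre_ excludes exactly the inputs on which Python A raises ValueError (no entry
-- matches the stripped lower-cased key exactly or by prefix in either direction).
def Pre_map_material (aria_material : String) : Prop :=
  (MATERIAL_MAP.any (fun kv =>
    let kl := PySem.Str.lower kv.1
    let key := stripLower aria_material
    kl = key || PySem.Str.startswith key kl || PySem.Str.startswith kl key)) = true
instance (aria_material : String) : Decidable (Pre_map_material aria_material) := by
  unfold Pre_map_material; infer_instance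

def pvWitness_map_material : String := " 6061-T6 "

def Spec_map_material (aria_material : String) (out : String) : Prop := out = map_material_alt aria_material
instance (aria_material : String) (out : String) : Decidable (Spec_map_material aria_material out) := by unfold Spec_map_material; infer_instance

-- ===== CLAIM (what is proved, stated in full; the proofs are below) =====
def Claim_equal_map_material : Prop := ∀ (aria_material : String), Dom_map_material aria_material → Pre_map_material aria_material → Spec_map_material aria_material (map_material aria_material)

-- ===== LEMMAS AND PROOFS =====

-- one scan with deferred fallback = exact pass, then the fallback, then the prefix pass
theorem scanOnce_eq (L : List (String × String)) (key : String) (fb : Option String) :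
    scanOnce L key fb =
      match findExact L key with
      | some v => some v
      | none => match fb with
                | some f => some f
                | none => findPrefix L key := by
  induction L generalizing fb with
  | nil => cases fb <;> simp [scanOnce, findExact, findPrefix]
  | cons kv rest ih =>
    obtain ⟨k, v⟩ := kv
    by_cases hx : PySem.Str.lower k = key
    · simp [scanOnce, findExact, hx]
    · cases fb with
      | some f => simp [scanOnce, findExact, findPrefix, hx, ih]
      | none =>
        by_cases hp : PySem.Str.startswith key (PySem.Str.lower k) || PySem.Str.startswith (PySem.Str.lower k) key
        all_goals
          simp only [PySem.Str.startswith_eq, PySem.Str.toList_lower, Bool.or_eq_true] at hp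
          simp [scanOnce, findExact, findPrefix, hx, hp, ih]

-- ===== VERDICT (by name: the statement is the Claim_ definition above) =====
theorem map_material_spec : Claim_equal_map_material := by
  intro s _ _
  unfold Spec_map_material map_material map_material_alt
  simp only [scanOnce_eq]
  cases h : findExact MATERIAL_MAP (stripLower s) <;> simp [h]
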